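-- pv_equiv track=rewrite | github.com/theemperorspath/0-click-takeover-demo | fullgen.py | gen_variants
-- ===== SOURCE A (Python) =====
-- import itertools
--
-- HOMO = {
--     'a': ['á','à','â','ä','а'],    # last is Cyrillic U+0430
--     'e': ['é','è','ë','е'],        # includes Cyrillic
--     'i': ['í','ì','ï','ι'],        # greek iota 'ι' sometimes
--     'o': ['ó','ò','ö','о'],        # Cyrillic 'о'
--     's': ['ś','š','ѕ'],            # Cyrillic 'ѕ'
--     'g': ['ɡ'],                    # Latin small script g (less common)
--     'm': ['м'],                    # Cyrillic 'м'
--     'l': ['ł','ⅼ'],                # etc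
--     # add other mappings as needed
-- }
--
-- MAX_SUBS = 2   # max number of simultaneous substitutions (keeps the set small)
--
-- def gen_variants(label, max_subs=MAX_SUBS):
--     label = label
--     positions = list(range(len(label)))
--     variants = set()
--     # zero-sub (original)
--     variants.add(label)
--     # for 1..max_subs substitutions
--     for k in range(1, max_subs+1):
--         for pos_combo in itertools.combinations(positions, k):
--             # for each chosen pos, pick a replacement (or skip if none)
--             choices = []
--             skip_combo = False
--             for pos in pos_combo:
--                 ch = label[pos].lower()
--                 if ch in HOMO:
--                     choices.append(HOMO[ch])
--                 else:
--                     skip_combo = True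
--                     break
--             if skip_combo:
--                 continue
--             # product of replacements
--             for repls in itertools.product(*choices):
--                 lab_list = list(label)
--                 for i,pos in enumerate(pos_combo):
--                     lab_list[pos] = repls[i]
--                 candidate = ''.join(lab_list)
--                 variants.add(candidate)
--     return variants
-- ===== SOURCE B (Python) =====
-- HOMO = {
--     'a': ['á','à','â','ä','а'],
--     'e': ['é','è','ë','е'],
--     'i': ['í','ì','ï','ι'],
--     'o': ['ó','ò','ö','о'],
--     's': ['ś','š','ѕ'],
--     'g': ['ɡ'],
--     'm': ['м'],
--     'l': ['ł','ⅼ'],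
-- }
--
-- MAX_SUBS = 2
--
-- def gen_variants(label, max_subs=MAX_SUBS):
--     # one pass collects the substitutable slots; recursion picks exactly k of them, then expands replacements
--     slots = [(p, HOMO[ch.lower()]) for p, ch in enumerate(label) if ch.lower() in HOMO]
--     out = {label}
--     def expand(chosen, cur):
--         if not chosen:
--             out.add(cur)
--         else:
--             p, reps = chosen[0]
--             for r in reps:
--                 expand(chosen[1:], cur[:p] + r + cur[p+1:])
--     def pick(rem, k, chosen):
--         if k == 0:
--             expand(chosen, label)
--         elif rem:
--             pick(rem[1:], k - 1, chosen + [rem[0]])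
--             pick(rem[1:], k, chosen)
--     for k in range(1, max_subs + 1):
--         pick(slots, k, [])
--     return out
-- ===== Notes on version B (the rewrite author's own statement) =====
-- stated objective: alternative
-- what changed: B precomputes the substitutable slots in one pass and enumerates variants by a recursive include/exclude backtracking over that slot list (expanding replacement choices recursively), instead of A's itertools.combinations over all positions with a per-combination eligibility scan and itertools.product.
import Mathlib
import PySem

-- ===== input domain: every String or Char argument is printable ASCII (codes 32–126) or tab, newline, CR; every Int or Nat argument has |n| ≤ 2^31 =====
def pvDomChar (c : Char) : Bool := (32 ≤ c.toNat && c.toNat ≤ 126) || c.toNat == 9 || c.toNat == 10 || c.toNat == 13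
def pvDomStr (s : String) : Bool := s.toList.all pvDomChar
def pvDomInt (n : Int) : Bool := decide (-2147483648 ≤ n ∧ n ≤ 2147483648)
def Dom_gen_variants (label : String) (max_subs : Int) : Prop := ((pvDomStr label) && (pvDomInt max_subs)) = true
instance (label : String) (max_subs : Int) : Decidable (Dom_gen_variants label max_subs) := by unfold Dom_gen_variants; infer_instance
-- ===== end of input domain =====

-- B replaces the itertools combinations+product enumeration by a recursive include/exclude
-- backtracking over a precomputed list of substitutable slots (objective: alternative decomposition).

-- ===== PORT A =====
-- module constant HOMO: keys are 1-char strings (modelled as Char), values lists of 1-char strings (Char)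
def pvHOMO : PySem.Dict Char (List Char) :=
  PySem.Dict.ofList
    [('a', ['á','à','â','ä','а']), ('e', ['é','è','ë','е']), ('i', ['í','ì','ï','ι']),
     ('o', ['ó','ò','ö','о']), ('s', ['ś','š','ѕ']), ('g', ['ɡ']), ('m', ['м']), ('l', ['ł','ⅼ'])]

-- itertools.combinations(xs, k), ported by hand: lexicographic order, exact
def pvCombinations {α : Type} : List α → Nat → List (List α)
  | _, 0 => [[]]
  | [], _ + 1 => []
  | x :: xs, k + 1 => (pvCombinations xs k).map (fun c => x :: c) ++ pvCombinations xs (k + 1)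

-- itertools.product(*choices), ported by hand: first factor varies slowest, exact
def pvProduct {α : Type} : List (List α) → List (List α)
  | [] => [[]]
  | c :: rest => c.flatMap (fun r => (pvProduct rest).map (fun rs => r :: rs))

-- A's choices loop with its skip_combo/break flag (none = combo skipped)
def pvChoices (cs : List Char) : List Nat → Option (List (List Char))
  | [] => some []
  | p :: rest =>
    match pvHOMO.get? (PySem.Chars.lowerChar (cs.getD p ' ')) with
    | none => none
    | some h => (pvChoices cs rest).map (fun t => h :: t)

-- the 'for i,pos in enumerate(pos_combo): lab_list[pos] = repls[i]' loop (positions are in range)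
def pvSubst : List Char → List Nat → List Char → List Char
  | cur, p :: ps, r :: rs => pvSubst (cur.set p r) ps rs
  | cur, _, _ => cur

def gen_variants (label : String) (max_subs : Int) : List String :=
  let cs := label.toList
  let positions : List Nat := List.range cs.length
  let variants : PySem.Set String := PySem.Set.add PySem.Set.empty label
  (PySem.List.pyRange 1 (max_subs + 1) 1).foldl (fun v k =>
    (pvCombinations positions k.toNat).foldl (fun v combo =>
      match pvChoices cs combo with
      | none => v
      | some choices =>
        (pvProduct choices).foldl (fun v repls =>
          PySem.Set.add v (String.ofList (pvSubst cs combo repls))) v) v) variants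

-- ===== PORT B =====
-- the slots comprehension: [(p, HOMO[ch.lower()]) for p, ch in enumerate(label) if ch.lower() in HOMO]
def pvSlots (cs : List Char) : List (Nat × List Char) :=
  cs.zipIdx.filterMap (fun pc => (pvHOMO.get? (PySem.Chars.lowerChar pc.1)).map (fun h => (pc.2, h)))

-- expand(chosen, cur): cur[:p] + r + cur[p+1:] is the slice surgery
def pvExpand : List (Nat × List Char) → List Char → PySem.Set String → PySem.Set String
  | [], cur, out => PySem.Set.add out (String.ofList cur)
  | (p, reps) :: rest, cur, out =>
    reps.foldl (fun out r =>
      pvExpand rest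
        (PySem.List.slice cur none (some (p : Int)) ++ [r] ++
         PySem.List.slice cur (some ((p : Int) + 1)) none) out) out

-- pick(rem, k, chosen): include rem[0] first, then exclude it
def pvPick (cs : List Char) : List (Nat × List Char) → Nat → List (Nat × List Char) → PySem.Set String → PySem.Set String
  | _, 0, chosen, out => pvExpand chosen cs out
  | [], _ + 1, _, out => out
  | s :: rem, k + 1, chosen, out => pvPick cs rem (k + 1) chosen (pvPick cs rem k (chosen ++ [s]) out)

def gen_variants_alt (label : String) (max_subs : Int) : List String :=
  let slots := pvSlots label.toList
  let out : PySem.Set String := PySem.Set.add PySem.Set.empty label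
  (PySem.List.pyRange 1 (max_subs + 1) 1).foldl (fun out k => pvPick label.toList slots k.toNat [] out) out

-- ===== PRECONDITION & SPEC =====
def Spec_gen_variants (label : String) (max_subs : Int) (out : List String) : Prop := out = gen_variants_alt label max_subs
instance (label : String) (max_subs : Int) (out : List String) : Decidable (Spec_gen_variants label max_subs out) := by unfold Spec_gen_variants; infer_instance

-- ===== CLAIM (what is proved, stated in full; the proofs are below) =====
def Claim_equal_gen_variants : Prop := ∀ (label : String) (max_subs : Int), Dom_gen_variants label max_subs → Spec_gen_variants label max_subs (gen_variants label max_subs)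

-- ===== LEMMAS AND PROOFS =====

-- pure-list counterparts of B's set-accumulating recursions
def expandL : List (Nat × List Char) → List Char → List String
  | [], cur => [String.ofList cur]
  | (p, reps) :: rest, cur =>
    reps.flatMap (fun r =>
      expandL rest
        (PySem.List.slice cur none (some (p : Int)) ++ [r] ++
         PySem.List.slice cur (some ((p : Int) + 1)) none))

def pickL (cs : List Char) : List (Nat × List Char) → Nat → List (Nat × List Char) → List String
  | _, 0, chosen => expandL chosen cs
  | [], _ + 1, _ => []
  | s :: rem, k + 1, chosen => pickL cs rem k (chosen ++ [s]) ++ pickL cs rem (k + 1) chosen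

-- the slots list written over an explicit position list
def slotsOf (cs : List Char) (ps : List Nat) : List (Nat × List Char) :=
  ps.filterMap (fun p => (pvHOMO.get? (PySem.Chars.lowerChar (cs.getD p ' '))).map (fun h => (p, h)))


theorem foldl_add_flatMap {α β : Type} [BEq β] (l : List α) (f : α → List β) (v : PySem.Set β) :
    l.foldl (fun v x => (f x).foldl PySem.Set.add v) v = (l.flatMap f).foldl PySem.Set.add v := by
  induction l generalizing v with
  | nil => rfl
  | cons x xs ih => simp [List.foldl_append, ih]

theorem expand_eq (chosen : List (Nat × List Char)) (cur : List Char) (out : PySem.Set String) :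
    pvExpand chosen cur out = (expandL chosen cur).foldl PySem.Set.add out := by
  induction chosen generalizing cur out with
  | nil => rfl
  | cons s rest ih =>
    obtain ⟨p, reps⟩ := s
    rw [pvExpand, expandL, ← foldl_add_flatMap]
    exact PySem.List.foldl_congr_mem reps _ _ out (fun out r _ => ih _ out)

theorem pick_eq (cs : List Char) (rem : List (Nat × List Char)) (k : Nat)
    (chosen : List (Nat × List Char)) (out : PySem.Set String) :
    pvPick cs rem k chosen out = (pickL cs rem k chosen).foldl PySem.Set.add out := by
  induction rem generalizing k chosen out with
  | nil => cases k with
    | zero => exact expand_eq _ _ _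
    | succ k => rfl
  | cons s rem ih =>
    cases k with
    | zero => exact expand_eq _ _ _
    | succ k => rw [pvPick, pickL, List.foldl_append, ih, ih]

theorem pickL_eq_flatMap (cs : List Char) (rem : List (Nat × List Char)) (k : Nat)
    (chosen : List (Nat × List Char)) :
    pickL cs rem k chosen = (pvCombinations rem k).flatMap (fun sel => expandL (chosen ++ sel) cs) := by
  induction rem generalizing k chosen with
  | nil => cases k with
    | zero => simp [pickL, pvCombinations]
    | succ k => simp [pickL, pvCombinations]
  | cons s rem ih =>
    cases k with
    | zero => simp [pickL, pvCombinations]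
    | succ k =>
      rw [pickL, pvCombinations, List.flatMap_append, List.flatMap_map, ih, ih]
      simp

-- surgery = List.set for an in-range position
theorem surgery_eq_set (cur : List Char) (p : Nat) (r : Char) (h : p < cur.length) :
    PySem.List.slice cur none (some (p : Int)) ++ [r] ++
      PySem.List.slice cur (some ((p : Int) + 1)) none = cur.set p r := by
  have h1 : ((p : Int) + 1) = ((p + 1 : Nat) : Int) := by push_cast; ring
  rw [PySem.List.slice_to_natCast, h1, PySem.List.slice_from_natCast,
    List.set_eq_take_append_cons_drop, if_pos h]
  simp

theorem expandL_eq_product (sel : List (Nat × List Char)) (cur : List Char)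
    (hb : ∀ x ∈ sel, x.1 < cur.length) :
    expandL sel cur =
      (pvProduct (sel.map Prod.snd)).map
        (fun rs => String.ofList (pvSubst cur (sel.map Prod.fst) rs)) := by
  induction sel generalizing cur with
  | nil => simp [expandL, pvProduct, pvSubst]
  | cons s rest ih =>
    obtain ⟨p, reps⟩ := s
    have hp : p < cur.length := hb (p, reps) (List.mem_cons_self ..)
    rw [expandL]
    rw [show (fun r => expandL rest
        (PySem.List.slice cur none (some (p : Int)) ++ [r] ++
         PySem.List.slice cur (some ((p : Int) + 1)) none))
      = fun r => expandL rest (cur.set p r) from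
        funext (fun r => by rw [surgery_eq_set cur p r hp])]
    have hb' : ∀ (r : Char), ∀ x ∈ rest, x.1 < (cur.set p r).length := by
      intro r x hx; rw [List.length_set]; exact hb x (List.mem_cons_of_mem _ hx)
    simp only [List.map_cons, pvProduct, List.map_flatMap, List.map_map]
    refine List.flatMap_congr ?_
    intro r _
    rw [ih (cur.set p r) (hb' r)]
    rfl

theorem choices_length {cs : List Char} {combo : List Nat} {chs : List (List Char)}
    (h : pvChoices cs combo = some chs) : chs.length = combo.length := by
  induction combo generalizing chs with
  | nil => simp [pvChoices] at h; simp [← h]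
  | cons p rest ih =>
    rw [pvChoices] at h
    cases hm : pvHOMO.get? (PySem.Chars.lowerChar (cs.getD p ' ')) with
    | none => rw [hm] at h; exact absurd h (by simp)
    | some hh =>
      rw [hm] at h
      cases hc : pvChoices cs rest with
      | none => rw [hc] at h; exact absurd h (by simp)
      | some t => rw [hc] at h; simp at h; simp [← h, ih hc]

-- the per-combo contribution of A, parametrised by the continuation G
def pvBranch (cs : List Char) (G : List (Nat × List Char) → List String) (combo : List Nat) : List String :=
  match pvChoices cs combo with
  | none => []
  | some chs => G (combo.zip chs)

theorem combos_bridge (cs : List Char) (ps : List Nat) (k : Nat)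
    (G : List (Nat × List Char) → List String) :
    (pvCombinations ps k).flatMap (pvBranch cs G)
      = (pvCombinations (slotsOf cs ps) k).flatMap G := by
  induction ps generalizing k G with
  | nil =>
    cases k with
    | zero => simp [pvCombinations, pvBranch, pvChoices, slotsOf]
    | succ k => simp [pvCombinations, slotsOf]
  | cons p ps ih =>
    cases k with
    | zero => simp [pvCombinations, pvBranch, pvChoices, slotsOf]
    | succ k =>
      rw [pvCombinations, List.flatMap_append, List.flatMap_map]
      cases hm : pvHOMO.get? (PySem.Chars.lowerChar (cs.getD p ' ')) with
      | none =>
        have hslot : slotsOf cs (p :: ps) = slotsOf cs ps := by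
          simp only [slotsOf, List.filterMap_cons, hm, Option.map_none]
        have hz : ∀ c : List Nat, pvBranch cs G (p :: c) = [] := by
          intro c; simp only [pvBranch, pvChoices, hm]
        rw [hslot, ← ih (k + 1) G]
        simp [hz]
      | some hh =>
        have hslot : slotsOf cs (p :: ps) = (p, hh) :: slotsOf cs ps := by
          simp only [slotsOf, List.filterMap_cons, hm, Option.map_some]
        have hz : ∀ c : List Nat,
            pvBranch cs G (p :: c) = pvBranch cs (fun sel => G ((p, hh) :: sel)) c := by
          intro c
          simp only [pvBranch, pvChoices, hm]
          cases pvChoices cs c with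
          | none => simp
          | some chs => simp [List.zip_cons_cons]
        rw [hslot, pvCombinations, List.flatMap_append, List.flatMap_map,
          ← ih k (fun sel => G ((p, hh) :: sel)), ← ih (k + 1) G]
        congr 1
        exact List.flatMap_congr (fun c _ => hz c)

theorem mem_of_mem_combinations {α : Type} {xs : List α} {k : Nat} {sel : List α}
    (h : sel ∈ pvCombinations xs k) : ∀ x ∈ sel, x ∈ xs := by
  induction xs generalizing k sel with
  | nil =>
    cases k with
    | zero => simp [pvCombinations] at h; simp [h]
    | succ k => simp [pvCombinations] at h
  | cons y ys ih =>
    cases k with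
    | zero => simp [pvCombinations] at h; simp [h]
    | succ k =>
      rw [pvCombinations] at h
      rcases List.mem_append.mp h with h1 | h2
      · obtain ⟨c, hc, rfl⟩ := List.mem_map.mp h1
        intro x hx
        rcases List.mem_cons.mp hx with rfl | hx'
        · exact List.mem_cons_self ..
        · exact List.mem_cons_of_mem _ (ih hc x hx')
      · intro x hx; exact List.mem_cons_of_mem _ (ih h2 x hx)

theorem slots_eq_aux (F : Char → Option (List Char)) (cs pre : List Char) :
    (cs.zipIdx pre.length).filterMap (fun pc => (F pc.1).map (fun h => (pc.2, h)))
      = (List.range' pre.length cs.length).filterMap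
          (fun p => (F ((pre ++ cs).getD p ' ')).map (fun h => (p, h))) := by
  induction cs generalizing pre with
  | nil => simp
  | cons c cs ih =>
    have hget : (pre ++ c :: cs).getD pre.length ' ' = c := by
      simp [List.getD]
    have ih' := ih (pre ++ [c])
    simp only [List.length_append, List.length_cons, List.length_nil, Nat.zero_add] at ih'
    rw [List.zipIdx_cons, List.length_cons, List.range'_succ, List.filterMap_cons, List.filterMap_cons,
      hget]
    have hre : (pre ++ [c]) ++ cs = pre ++ c :: cs := by simp
    rw [hre] at ih'
    cases hF : F c with
    | none => simp only [Option.map_none]; exact ih'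
    | some hh => simp only [Option.map_some]; rw [ih']

theorem slots_eq (cs : List Char) : pvSlots cs = slotsOf cs (List.range cs.length) := by
  have := slots_eq_aux (fun c => pvHOMO.get? (PySem.Chars.lowerChar c)) cs []
  simpa [pvSlots, slotsOf, List.range_eq_range'] using this

theorem aLayer_eq (cs : List Char) (kk : Nat) (v : PySem.Set String) :
    ((pvCombinations (List.range cs.length) kk).foldl (fun v combo =>
      match pvChoices cs combo with
      | none => v
      | some choices =>
        (pvProduct choices).foldl (fun v repls =>
          PySem.Set.add v (String.ofList (pvSubst cs combo repls))) v) v)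
      = ((pvCombinations (pvSlots cs) kk).flatMap (fun sel => expandL sel cs)).foldl PySem.Set.add v := by
  have step1 : ∀ (v : PySem.Set String) (combo : List Nat),
      (match pvChoices cs combo with
        | none => v
        | some choices =>
          (pvProduct choices).foldl (fun v repls =>
            PySem.Set.add v (String.ofList (pvSubst cs combo repls))) v)
      = ((match pvChoices cs combo with
          | none => ([] : List String)
          | some chs => (pvProduct chs).map (fun rs => String.ofList (pvSubst cs combo rs)))).foldl PySem.Set.add v := by
    intro v combo
    cases hc : pvChoices cs combo with
    | none => rfl
    | some chs => rw [List.foldl_map]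
  rw [PySem.List.foldl_congr_mem _ _
      (fun v combo => ((match pvChoices cs combo with
          | none => ([] : List String)
          | some chs => (pvProduct chs).map (fun rs => String.ofList (pvSubst cs combo rs)))).foldl PySem.Set.add v)
      v (fun v combo _ => step1 v combo),
    foldl_add_flatMap]
  congr 1
  have step3 : ∀ combo ∈ pvCombinations (List.range cs.length) kk,
      (match pvChoices cs combo with
        | none => ([] : List String)
        | some chs => (pvProduct chs).map (fun rs => String.ofList (pvSubst cs combo rs)))
      = pvBranch cs (fun sel => expandL sel cs) combo := by
    intro combo hcombo
    cases hc : pvChoices cs combo with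
    | none => simp [pvBranch, hc]
    | some chs =>
      simp only [pvBranch, hc]
      have hlen : chs.length = combo.length := choices_length hc
      have hb : ∀ x ∈ combo.zip chs, x.1 < cs.length := by
        intro x hx
        obtain ⟨a, b⟩ := x
        have hx1 : a ∈ combo := (List.of_mem_zip hx).1
        exact List.mem_range.mp (mem_of_mem_combinations hcombo a hx1)
      rw [expandL_eq_product (combo.zip chs) cs hb,
        List.map_fst_zip (by omega), List.map_snd_zip (by omega)]
  rw [slots_eq, ← combos_bridge]
  exact List.flatMap_congr step3

-- ===== VERDICT (by name: the statement is the Claim_ definition above) =====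
theorem gen_variants_spec : Claim_equal_gen_variants := by
  intro label max_subs _
  unfold Spec_gen_variants gen_variants gen_variants_alt
  refine PySem.List.foldl_congr_mem _ _ _ _ (fun v k _ => ?_)
  rw [pick_eq, pickL_eq_flatMap, aLayer_eq]
  simp
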